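-- pv_equiv track=rewrite | github.com/uetlens-code/uetlens | uetlens/overlap.py | _format_filename
-- ===== SOURCE A (Python) =====
-- def _format_filename(subtype, coarse_mapping):
--     for group, subtypes in coarse_mapping.items():
--         if subtype in subtypes:
--             if group == "Contact":
--                 if subtype == "Meet":
--                     return "Contact_Meet_vector_ids.txt"
--                 elif subtype == "Phone-Write":
--                     return "Contact_Phone_Write_vector_ids.txt"
--             elif group == "Justice":
--                 if subtype == "Trial-Hearing":
--                     return "Justice_Trial_Hearing_vector_ids.txt"
--                 elif subtype == "Charge-Indict":
--                     return "Justice_Charge_Indict_vector_ids.txt"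
--             elif group == "Life":
--                 if subtype == "Die":
--                     return "Life_Die_vector_ids.txt"
--                 elif subtype == "Injure":
--                     return "Life_Injure_vector_ids.txt"
--             elif group == "Conflict":
--                 if subtype == "Attack":
--                     return "Conflict_Attack_vector_ids.txt"
--             elif group == "Movement":
--                 if subtype == "Transport":
--                     return "Movement_Transport_vector_ids.txt"
--             elif group == "Personnel":
--                 if subtype == "Elect":
--                     return "Personnel_Elect_vector_ids.txt"
--                 elif subtype == "Start-Position":
--                     return "Personnel_Start_Position_vector_ids.txt"
--                 elif subtype == "End-Position":
--                     return "Personnel_End_Position_vector_ids.txt"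
--             elif group == "Transaction":
--                 if subtype == "Transfer-Ownership":
--                     return "Transaction_Transfer_Ownership_vector_ids.txt"
--                 elif subtype == "Transfer-Money":
--                     return "Transaction_Transfer_Money_vector_ids.txt"
--     return f"{subtype}_vector_ids.txt"
-- ===== SOURCE B (Python) =====
-- _GROUP_OF = {
--     "Meet": "Contact", "Phone-Write": "Contact",
--     "Trial-Hearing": "Justice", "Charge-Indict": "Justice",
--     "Die": "Life", "Injure": "Life",
--     "Attack": "Conflict",
--     "Transport": "Movement",
--     "Elect": "Personnel", "Start-Position": "Personnel", "End-Position": "Personnel",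
--     "Transfer-Ownership": "Transaction", "Transfer-Money": "Transaction",
-- }
--
-- def _format_filename(subtype, coarse_mapping):
--     group = _GROUP_OF.get(subtype)
--     if group is not None and subtype in coarse_mapping.get(group, ()):
--         return f"{group}_{subtype.replace('-', '_')}_vector_ids.txt"
--     return f"{subtype}_vector_ids.txt"
-- ===== Notes on version B (the rewrite author's own statement) =====
-- stated objective: simpler
-- what changed: Inverts the branch table into a module-level subtype->group dict built once, so the scan of coarse_mapping disappears: B does one _GROUP_OF.get(subtype) plus one keyed coarse_mapping.get(group) membership test and builds the filename from a closed-form template.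
import Mathlib
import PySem

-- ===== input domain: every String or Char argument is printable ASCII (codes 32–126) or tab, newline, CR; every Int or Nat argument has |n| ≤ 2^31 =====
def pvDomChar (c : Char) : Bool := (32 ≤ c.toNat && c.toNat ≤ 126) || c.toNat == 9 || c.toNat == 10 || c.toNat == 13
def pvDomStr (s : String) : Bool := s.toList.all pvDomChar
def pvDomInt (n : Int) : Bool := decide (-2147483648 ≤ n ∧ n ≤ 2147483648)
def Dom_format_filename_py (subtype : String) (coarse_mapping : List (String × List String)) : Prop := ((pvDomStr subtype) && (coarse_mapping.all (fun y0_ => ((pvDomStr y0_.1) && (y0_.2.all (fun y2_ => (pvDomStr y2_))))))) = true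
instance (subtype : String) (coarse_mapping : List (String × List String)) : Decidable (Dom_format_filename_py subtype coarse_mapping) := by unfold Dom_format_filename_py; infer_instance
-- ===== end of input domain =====

-- B inverts the branch table into a subtype->group dict built once and replaces A's scan of
-- coarse_mapping by a single keyed lookup coarse_mapping.get(group) (simpler decomposition; return value only).


-- ===== PORT A =====
-- loop over coarse_mapping.items(); the nested if-chains fall through to the next item
def pvLoopA (subtype : String) : List (String × List String) → String
  | [] => subtype ++ "_vector_ids.txt"
  | (group, subtypes) :: rest =>
    if subtype ∈ subtypes then
      if group = "Contact" then
        if subtype = "Meet" then "Contact_Meet_vector_ids.txt"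
        else if subtype = "Phone-Write" then "Contact_Phone_Write_vector_ids.txt"
        else pvLoopA subtype rest
      else if group = "Justice" then
        if subtype = "Trial-Hearing" then "Justice_Trial_Hearing_vector_ids.txt"
        else if subtype = "Charge-Indict" then "Justice_Charge_Indict_vector_ids.txt"
        else pvLoopA subtype rest
      else if group = "Life" then
        if subtype = "Die" then "Life_Die_vector_ids.txt"
        else if subtype = "Injure" then "Life_Injure_vector_ids.txt"
        else pvLoopA subtype rest
      else if group = "Conflict" then
        if subtype = "Attack" then "Conflict_Attack_vector_ids.txt"
        else pvLoopA subtype rest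
      else if group = "Movement" then
        if subtype = "Transport" then "Movement_Transport_vector_ids.txt"
        else pvLoopA subtype rest
      else if group = "Personnel" then
        if subtype = "Elect" then "Personnel_Elect_vector_ids.txt"
        else if subtype = "Start-Position" then "Personnel_Start_Position_vector_ids.txt"
        else if subtype = "End-Position" then "Personnel_End_Position_vector_ids.txt"
        else pvLoopA subtype rest
      else if group = "Transaction" then
        if subtype = "Transfer-Ownership" then "Transaction_Transfer_Ownership_vector_ids.txt"
        else if subtype = "Transfer-Money" then "Transaction_Transfer_Money_vector_ids.txt"
        else pvLoopA subtype rest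
      else pvLoopA subtype rest
    else pvLoopA subtype rest

def format_filename_py (subtype : String) (coarse_mapping : List (String × List String)) : String :=
  pvLoopA subtype coarse_mapping

-- ===== PORT B =====
-- _GROUP_OF: the inverted table, subtype -> its recognized group (a module-level Python dict)
def pvGroupOf : PySem.Dict String String :=
  PySem.Dict.mk
    [("Meet", "Contact"), ("Phone-Write", "Contact"),
     ("Trial-Hearing", "Justice"), ("Charge-Indict", "Justice"),
     ("Die", "Life"), ("Injure", "Life"),
     ("Attack", "Conflict"),
     ("Transport", "Movement"),
     ("Elect", "Personnel"), ("Start-Position", "Personnel"), ("End-Position", "Personnel"),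
     ("Transfer-Ownership", "Transaction"), ("Transfer-Money", "Transaction")]

-- group = _GROUP_OF.get(subtype); if group is not None and subtype in coarse_mapping.get(group, ()): …
def format_filename_py_alt (subtype : String) (coarse_mapping : List (String × List String)) : String :=
  match PySem.Dict.get? pvGroupOf subtype with
  | none => subtype ++ "_vector_ids.txt"
  | some group =>
    if subtype ∈ ((PySem.Dict.mk coarse_mapping).get? group).getD [] then
      group ++ "_" ++ PySem.Str.replace subtype "-" "_" ++ "_vector_ids.txt"
    else subtype ++ "_vector_ids.txt"

-- ===== PRECONDITION & SPEC =====
-- Pre_ excludes association lists with duplicate keys, which cannot represent a Python dict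
-- (dict.items() yields each key at most once); on such lists A scans every duplicate entry
-- while B consults only the first, so nothing about a real dict input is excluded.
def Pre_format_filename_py (subtype : String) (coarse_mapping : List (String × List String)) : Prop :=
  (coarse_mapping.map Prod.fst).Nodup
instance (subtype : String) (coarse_mapping : List (String × List String)) : Decidable (Pre_format_filename_py subtype coarse_mapping) := by unfold Pre_format_filename_py; infer_instance
def pvWitness_format_filename_py : String × (List (String × List String)) :=
  ("Meet", [("Contact", ["Meet", "Phone-Write"]), ("Life", ["Die"])])
def Spec_format_filename_py (subtype : String) (coarse_mapping : List (String × List String)) (out : String) : Prop := out = format_filename_py_alt subtype coarse_mapping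
instance (subtype : String) (coarse_mapping : List (String × List String)) (out : String) : Decidable (Spec_format_filename_py subtype coarse_mapping out) := by unfold Spec_format_filename_py; infer_instance

-- ===== CLAIM =====
def Claim_equal_format_filename_py : Prop := ∀ (subtype : String) (coarse_mapping : List (String × List String)), Dom_format_filename_py subtype coarse_mapping → Pre_format_filename_py subtype coarse_mapping → Spec_format_filename_py subtype coarse_mapping (format_filename_py subtype coarse_mapping)

-- ===== LEMMAS AND PROOFS =====

-- the inverted table misses subtype: it is none of the 13 recognized subtypes
theorem groupOf_none (subtype : String) (h : PySem.Dict.get? pvGroupOf subtype = none) :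
    subtype ≠ "Meet" ∧ subtype ≠ "Phone-Write" ∧ subtype ≠ "Trial-Hearing" ∧
    subtype ≠ "Charge-Indict" ∧ subtype ≠ "Die" ∧ subtype ≠ "Injure" ∧
    subtype ≠ "Attack" ∧ subtype ≠ "Transport" ∧ subtype ≠ "Elect" ∧
    subtype ≠ "Start-Position" ∧ subtype ≠ "End-Position" ∧
    subtype ≠ "Transfer-Ownership" ∧ subtype ≠ "Transfer-Money" := by
  refine ⟨?_, ?_, ?_, ?_, ?_, ?_, ?_, ?_, ?_, ?_, ?_, ?_, ?_⟩ <;>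
    (intro hs; subst hs; exact absurd h (by decide))

-- the inverted table hits: subtype and its group are one of the 13 recognized pairs
theorem groupOf_some (subtype g : String) (h : PySem.Dict.get? pvGroupOf subtype = some g) :
    (subtype = "Meet" ∧ g = "Contact") ∨ (subtype = "Phone-Write" ∧ g = "Contact") ∨
    (subtype = "Trial-Hearing" ∧ g = "Justice") ∨ (subtype = "Charge-Indict" ∧ g = "Justice") ∨
    (subtype = "Die" ∧ g = "Life") ∨ (subtype = "Injure" ∧ g = "Life") ∨
    (subtype = "Attack" ∧ g = "Conflict") ∨ (subtype = "Transport" ∧ g = "Movement") ∨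
    (subtype = "Elect" ∧ g = "Personnel") ∨ (subtype = "Start-Position" ∧ g = "Personnel") ∨
    (subtype = "End-Position" ∧ g = "Personnel") ∨ (subtype = "Transfer-Ownership" ∧ g = "Transaction") ∨
    (subtype = "Transfer-Money" ∧ g = "Transaction") := by
  by_cases e1 : subtype = "Meet"
  · subst e1; rw [(by decide : PySem.Dict.get? pvGroupOf "Meet" = some "Contact")] at h
    exact Or.inl ⟨rfl, (Option.some.inj h).symm⟩
  by_cases e2 : subtype = "Phone-Write"
  · subst e2; rw [(by decide : PySem.Dict.get? pvGroupOf "Phone-Write" = some "Contact")] at h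
    exact Or.inr <| Or.inl ⟨rfl, (Option.some.inj h).symm⟩
  by_cases e3 : subtype = "Trial-Hearing"
  · subst e3; rw [(by decide : PySem.Dict.get? pvGroupOf "Trial-Hearing" = some "Justice")] at h
    exact Or.inr <| Or.inr <| Or.inl ⟨rfl, (Option.some.inj h).symm⟩
  by_cases e4 : subtype = "Charge-Indict"
  · subst e4; rw [(by decide : PySem.Dict.get? pvGroupOf "Charge-Indict" = some "Justice")] at h
    exact Or.inr <| Or.inr <| Or.inr <| Or.inl ⟨rfl, (Option.some.inj h).symm⟩
  by_cases e5 : subtype = "Die"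
  · subst e5; rw [(by decide : PySem.Dict.get? pvGroupOf "Die" = some "Life")] at h
    exact Or.inr <| Or.inr <| Or.inr <| Or.inr <| Or.inl ⟨rfl, (Option.some.inj h).symm⟩
  by_cases e6 : subtype = "Injure"
  · subst e6; rw [(by decide : PySem.Dict.get? pvGroupOf "Injure" = some "Life")] at h
    exact Or.inr <| Or.inr <| Or.inr <| Or.inr <| Or.inr <| Or.inl ⟨rfl, (Option.some.inj h).symm⟩
  by_cases e7 : subtype = "Attack"
  · subst e7; rw [(by decide : PySem.Dict.get? pvGroupOf "Attack" = some "Conflict")] at h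
    exact Or.inr <| Or.inr <| Or.inr <| Or.inr <| Or.inr <| Or.inr <| Or.inl ⟨rfl, (Option.some.inj h).symm⟩
  by_cases e8 : subtype = "Transport"
  · subst e8; rw [(by decide : PySem.Dict.get? pvGroupOf "Transport" = some "Movement")] at h
    exact Or.inr <| Or.inr <| Or.inr <| Or.inr <| Or.inr <| Or.inr <| Or.inr <| Or.inl ⟨rfl, (Option.some.inj h).symm⟩
  by_cases e9 : subtype = "Elect"
  · subst e9; rw [(by decide : PySem.Dict.get? pvGroupOf "Elect" = some "Personnel")] at h
    exact Or.inr <| Or.inr <| Or.inr <| Or.inr <| Or.inr <| Or.inr <| Or.inr <| Or.inr <| Or.inl ⟨rfl, (Option.some.inj h).symm⟩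
  by_cases e10 : subtype = "Start-Position"
  · subst e10; rw [(by decide : PySem.Dict.get? pvGroupOf "Start-Position" = some "Personnel")] at h
    exact Or.inr <| Or.inr <| Or.inr <| Or.inr <| Or.inr <| Or.inr <| Or.inr <| Or.inr <| Or.inr <| Or.inl ⟨rfl, (Option.some.inj h).symm⟩
  by_cases e11 : subtype = "End-Position"
  · subst e11; rw [(by decide : PySem.Dict.get? pvGroupOf "End-Position" = some "Personnel")] at h
    exact Or.inr <| Or.inr <| Or.inr <| Or.inr <| Or.inr <| Or.inr <| Or.inr <| Or.inr <| Or.inr <| Or.inr <| Or.inl ⟨rfl, (Option.some.inj h).symm⟩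
  by_cases e12 : subtype = "Transfer-Ownership"
  · subst e12; rw [(by decide : PySem.Dict.get? pvGroupOf "Transfer-Ownership" = some "Transaction")] at h
    exact Or.inr <| Or.inr <| Or.inr <| Or.inr <| Or.inr <| Or.inr <| Or.inr <| Or.inr <| Or.inr <| Or.inr <| Or.inr <| Or.inl ⟨rfl, (Option.some.inj h).symm⟩
  by_cases e13 : subtype = "Transfer-Money"
  · subst e13; rw [(by decide : PySem.Dict.get? pvGroupOf "Transfer-Money" = some "Transaction")] at h
    exact Or.inr <| Or.inr <| Or.inr <| Or.inr <| Or.inr <| Or.inr <| Or.inr <| Or.inr <| Or.inr <| Or.inr <| Or.inr <| Or.inr <| ⟨rfl, (Option.some.inj h).symm⟩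
  exfalso
  have hn : PySem.Dict.get? pvGroupOf subtype = none := by
    rw [PySem.Dict.get?_eq_none_iff_not_mem_keys]
    simp [pvGroupOf, PySem.Dict.keys, e1, e2, e3, e4, e5, e6, e7, e8, e9, e10, e11, e12, e13]
  simp [hn] at h

-- if subtype is not a recognized subtype, every branch of A's chain falls through
theorem loopA_default (subtype : String)
    (h : PySem.Dict.get? pvGroupOf subtype = none) :
    ∀ m, pvLoopA subtype m = subtype ++ "_vector_ids.txt" := by
  have h13 := groupOf_none subtype h
  intro m
  induction m with
  | nil => rfl
  | cons hd rest ih =>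
    obtain ⟨group, lst⟩ := hd
    obtain ⟨n1, n2, n3, n4, n5, n6, n7, n8, n9, n10, n11, n12, n13⟩ := h13
    simp only [pvLoopA]
    simp [n1, n2, n3, n4, n5, n6, n7, n8, n9, n10, n11, n12, n13, ih]

-- generic shape: if A's step falls through on entries with key ≠ g and returns `special`
-- on key g, then on a nodup-keyed list A equals "look up g once, test membership"
theorem loopA_keyed (s g special : String)
    (H1 : ∀ group lst rest, s ∈ lst → group ≠ g →
        pvLoopA s ((group, lst) :: rest) = pvLoopA s rest)
    (H1' : ∀ group lst rest, s ∉ lst →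
        pvLoopA s ((group, lst) :: rest) = pvLoopA s rest)
    (H2 : ∀ lst rest, s ∈ lst → pvLoopA s ((g, lst) :: rest) = special) :
    ∀ m, (m.map Prod.fst).Nodup →
      pvLoopA s m =
        if s ∈ ((PySem.Dict.mk m).get? g).getD [] then special
        else s ++ "_vector_ids.txt" := by
  intro m
  induction m with
  | nil => intro _; simp [pvLoopA, PySem.Dict.get?]
  | cons hd rest ih =>
    intro hnd
    obtain ⟨group, lst⟩ := hd
    rw [List.map_cons, List.nodup_cons] at hnd
    obtain ⟨hnot, hnd'⟩ := hnd
    by_cases hgg : group = g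
    · subst hgg
      have hget : (PySem.Dict.mk ((group, lst) :: rest)).get? group = some lst := by
        rw [PySem.Dict.get?_mk_cons]; simp
      rw [hget, Option.getD_some]
      by_cases hmem : s ∈ lst
      · rw [H2 _ _ hmem, if_pos hmem]
      · rw [H1' _ _ _ hmem, if_neg hmem, ih hnd']
        have hn : (PySem.Dict.mk rest).get? group = none := by
          rw [PySem.Dict.get?_eq_none_iff_not_mem_keys]
          simpa [PySem.Dict.keys] using hnot
        rw [hn]
        simp
    · have hget : (PySem.Dict.mk ((group, lst) :: rest)).get? g = (PySem.Dict.mk rest).get? g := by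
        rw [PySem.Dict.get?_mk_cons]; simp [hgg]
      rw [hget]
      by_cases hmem : s ∈ lst
      · rw [H1 _ _ _ hmem hgg]; exact ih hnd'
      · rw [H1' _ _ _ hmem]; exact ih hnd'

-- ===== VERDICT =====
theorem format_filename_py_spec : Claim_equal_format_filename_py := by
  intro subtype m _ hpre
  unfold Spec_format_filename_py format_filename_py format_filename_py_alt
  rcases hgo : PySem.Dict.get? pvGroupOf subtype with _ | g
  · exact loopA_default subtype hgo m
  · rcases groupOf_some subtype g hgo with
      ⟨hs, hg⟩|⟨hs, hg⟩|⟨hs, hg⟩|⟨hs, hg⟩|⟨hs, hg⟩|⟨hs, hg⟩|⟨hs, hg⟩|⟨hs, hg⟩|⟨hs, hg⟩|⟨hs, hg⟩|⟨hs, hg⟩|⟨hs, hg⟩|⟨hs, hg⟩ <;>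
    subst hs <;> subst hg <;>
    refine loopA_keyed _ _ _ ?_ ?_ ?_ m hpre <;>
      first
        | (intro group lst rest hmem hne; simp only [pvLoopA]; rw [if_pos hmem];
           simp [hne])
        | (intro group lst rest hmem; simp only [pvLoopA]; rw [if_neg hmem])
        | (intro lst rest hmem; simp only [pvLoopA]; rw [if_pos hmem]; simp; try decide)
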